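-- pv_equiv track=rewrite | github.com/MohamedLashuel/Autostep | array2chart.py | makeChartCode
-- ===== SOURCE A (Python) =====
-- from typing import Iterable
--
-- DIVISION = 32
--
-- def makeChartCode(beats: Iterable[int]) -> str:
-- 	beats = list(set(beats))
-- 	txt = ''
-- 	has_beat = [(n in beats) for n in range(max(beats))]
-- 	i = 0
-- 	for tf in has_beat:
-- 		if i % DIVISION == 0:
-- 			txt += '/'
-- 		if tf:
-- 			txt += 'n'
-- 		else:
-- 			txt += '.'
-- 		i += 1
-- 	return txt
-- ===== SOURCE B (Python) =====
-- DIVISION = 32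
--
-- def makeChartCode(beats):
--     beatset = set(beats)
--     markers = ''.join('n' if n in beatset else '.' for n in range(max(beats)))
--     return ''.join('/' + markers[i:i + DIVISION] for i in range(0, len(markers), DIVISION))
-- ===== Notes on version B (the rewrite author's own statement) =====
-- stated objective: faster
-- what changed: B builds the full marker string in one set-membership pass and then inserts the '/' dividers in a second chunk-slicing pass, instead of A's single position-by-position loop that tests list membership and interleaves divider placement via a manual counter.
-- outside the precondition, e.g. on makeChartCode([]): A raises ValueError, B raises ValueError
import Mathlib
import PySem

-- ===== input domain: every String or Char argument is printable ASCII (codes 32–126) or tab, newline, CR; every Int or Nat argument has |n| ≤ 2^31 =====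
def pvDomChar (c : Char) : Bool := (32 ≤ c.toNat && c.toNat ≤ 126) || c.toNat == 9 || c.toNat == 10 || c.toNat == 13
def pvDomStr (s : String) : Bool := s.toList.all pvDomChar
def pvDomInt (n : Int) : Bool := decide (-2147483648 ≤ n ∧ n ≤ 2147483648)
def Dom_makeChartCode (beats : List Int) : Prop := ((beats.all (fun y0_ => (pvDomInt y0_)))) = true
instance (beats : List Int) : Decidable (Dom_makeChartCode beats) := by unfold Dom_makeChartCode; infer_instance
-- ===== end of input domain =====

-- B separates marker generation (one membership pass) from divider placement (chunked slicing),
-- where A interleaves both in a single position loop with a manual counter.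

def DIVISION : Int := 32

-- ===== PORT A =====
def makeChartCode (beats : List Int) : String :=
  let beats' : PySem.Set Int := PySem.Set.ofList beats
  match PySem.List.max? beats' (fun x => x) with
  | none => ""   -- max([]) raises ValueError; such inputs are excluded by Pre_
  | some mx =>
    let has_beat : List Bool := (PySem.List.pyRange 0 mx 1).map (fun n => decide (n ∈ beats'))
    let r := has_beat.foldl (fun (st : List Char × Int) tf =>
        let txt := if PySem.Int.mod st.2 DIVISION = 0 then st.1 ++ ['/'] else st.1
        let txt := if tf then txt ++ ['n'] else txt ++ ['.']
        (txt, st.2 + 1)) ([], 0)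
    String.mk r.1

-- ===== PORT B =====
def makeChartCode_alt (beats : List Int) : String :=
  match PySem.List.max? beats (fun x => x) with
  | none => ""   -- max(beats) raises ValueError; such inputs are excluded by Pre_
  | some mx =>
    let beatset : PySem.Set Int := PySem.Set.ofList beats
    let markers : List Char :=
      (PySem.List.pyRange 0 mx 1).map (fun n => if decide (n ∈ beatset) then 'n' else '.')
    String.mk
      (((PySem.List.pyRange 0 (markers.length : Int) DIVISION).map
        (fun i => '/' :: PySem.List.slice markers (some i) (some (i + DIVISION)))).flatten)

-- ===== PRECONDITION & SPEC =====
-- Pre_ excludes only the empty list, on which Python's max(beats) raises ValueError in both A and B.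
def Pre_makeChartCode (beats : List Int) : Prop := beats ≠ []
instance (beats : List Int) : Decidable (Pre_makeChartCode beats) := by
  unfold Pre_makeChartCode; infer_instance
def pvWitness_makeChartCode : List Int := ([4, 0, 33])

def Spec_makeChartCode (beats : List Int) (out : String) : Prop := out = makeChartCode_alt beats
instance (beats : List Int) (out : String) : Decidable (Spec_makeChartCode beats out) := by
  unfold Spec_makeChartCode; infer_instance

-- ===== CLAIM (what is proved, stated in full; the proofs are below) =====
def Claim_equal_makeChartCode : Prop := ∀ (beats : List Int), Dom_makeChartCode beats → Pre_makeChartCode beats → Spec_makeChartCode beats (makeChartCode beats)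

-- ===== LEMMAS AND PROOFS =====

-- the character A appends for one position
def charOf (b : Bool) : Char := if b then 'n' else '.'

-- A's loop body, as a structural recursion on the remaining flags with the running counter
def refA : List Bool → Int → List Char
  | [], _ => []
  | tf :: t, i =>
      (if PySem.Int.mod i DIVISION = 0 then ['/'] else []) ++ [charOf tf] ++ refA t (i + 1)

-- divider-per-32-chunk reference recursion
def chunkRef : List Char → List Char
  | [] => []
  | c :: t => '/' :: (List.take 32 (c :: t) ++ chunkRef (List.drop 32 (c :: t)))
termination_by M => M.length
decreasing_by simp [List.length_drop]

theorem foldA_txt (hb : List Bool) (txt : List Char) (i : Int) :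
    (hb.foldl (fun (st : List Char × Int) tf =>
        ((if tf = true then (if PySem.Int.mod st.2 DIVISION = 0 then st.1 ++ ['/'] else st.1) ++ ['n']
          else (if PySem.Int.mod st.2 DIVISION = 0 then st.1 ++ ['/'] else st.1) ++ ['.']),
         st.2 + 1)) (txt, i)).1 = txt ++ refA hb i := by
  induction hb generalizing txt i with
  | nil => simp [refA]
  | cons tf t ih =>
      simp only [List.foldl_cons, refA]
      rw [ih]
      split_ifs <;> simp_all [charOf]

theorem refA_block (r : Nat) (hb : List Bool) (i : Int) (h0 : 0 ≤ i)
    (h2 : PySem.Int.mod i DIVISION + r = 32) (h3 : r < 32) :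
    refA hb i = (hb.take r).map charOf ++ refA (hb.drop r) (i + r) := by
  induction r generalizing hb i with
  | zero =>
      exfalso
      rw [PySem.Int.mod_eq_emod_of_pos (by norm_num [DIVISION] : (0:Int) < DIVISION)] at h2
      have := Int.emod_lt_of_pos i (show (0:Int) < 32 by norm_num)
      simp [DIVISION] at h2; omega
  | succ r ih =>
      have hmod : i % 32 = 31 - r := by
        rw [PySem.Int.mod_eq_emod_of_pos (by norm_num [DIVISION] : (0:Int) < DIVISION)] at h2
        simp [DIVISION] at h2; omega
      cases hb with
      | nil => simp [refA]
      | cons tf t =>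
          have hne : ¬ PySem.Int.mod i DIVISION = 0 := by
            rw [PySem.Int.mod_eq_emod_of_pos (by norm_num [DIVISION] : (0:Int) < DIVISION)]
            simp [DIVISION]; omega
          rw [refA, if_neg hne]
          by_cases hr : r = 0
          · subst hr
            simp [List.take_succ_cons, List.drop_succ_cons]
          · have hmod1 : PySem.Int.mod (i + 1) DIVISION + r = 32 := by
              rw [PySem.Int.mod_eq_emod_of_pos (by norm_num [DIVISION] : (0:Int) < DIVISION)]
              simp [DIVISION]
              omega
            rw [ih t (i + 1) (by omega) hmod1 (by omega)]
            simp [List.take_succ_cons, List.drop_succ_cons]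
            congr 1
            omega

theorem refA_chunk (hb : List Bool) (i : Int) (hne : hb ≠ []) (h0 : 0 ≤ i)
    (hmod : PySem.Int.mod i DIVISION = 0) :
    refA hb i = '/' :: ((hb.take 32).map charOf ++ refA (hb.drop 32) (i + 32)) := by
  cases hb with
  | nil => exact absurd rfl hne
  | cons tf t =>
      rw [refA, if_pos hmod]
      have h1 : PySem.Int.mod (i + 1) DIVISION + 31 = 32 := by
        rw [PySem.Int.mod_eq_emod_of_pos (by norm_num [DIVISION] : (0:Int) < DIVISION)]
        rw [PySem.Int.mod_eq_emod_of_pos (by norm_num [DIVISION] : (0:Int) < DIVISION)] at hmod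
        simp [DIVISION] at hmod ⊢
        omega
      rw [refA_block 31 t (i + 1) (by omega) h1 (by omega)]
      have ht : List.take 32 (tf :: t) = tf :: List.take 31 t := rfl
      have hd : List.drop 32 (tf :: t) = List.drop 31 t := rfl
      rw [ht, hd]
      simp
      congr 1
      omega

theorem refA_eq_chunkRef (n : Nat) (hb : List Bool) (i : Int) (hn : hb.length ≤ n)
    (h0 : 0 ≤ i) (hmod : PySem.Int.mod i DIVISION = 0) :
    refA hb i = chunkRef (hb.map charOf) := by
  induction n generalizing hb i with
  | zero =>
      have : hb = [] := List.length_eq_zero_iff.mp (by omega)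
      subst this; simp [refA, chunkRef]
  | succ n ih =>
      cases hhb : hb with
      | nil => simp [refA, chunkRef]
      | cons tf t =>
          rw [refA_chunk (tf :: t) i (by simp) h0 hmod]
          have hmap : (tf :: t).map charOf = charOf tf :: t.map charOf := rfl
          rw [hmap, chunkRef]
          rw [← hmap, ← List.map_take, ← List.map_drop]
          congr 1
          rw [ih ((tf :: t).drop 32) (i + 32) (by subst hhb; simp at hn ⊢; omega) (by omega)
            (by rw [PySem.Int.mod_eq_emod_of_pos (by norm_num [DIVISION] : (0:Int) < DIVISION)] at hmod ⊢
                simp [DIVISION] at hmod ⊢; omega)]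

-- number of chunks for a marker string of length L
theorem chunkJoin_eq_chunkRef (M : List Char) :
    ((PySem.List.pyRange 0 (M.length : Int) DIVISION).map
      (fun i => '/' :: PySem.List.slice M (some i) (some (i + DIVISION)))).flatten
    = chunkRef M := by
  rw [PySem.List.pyRange_of_pos 0 (M.length : Int) (by norm_num [DIVISION])]
  induction M using chunkRef.induct with
  | case1 => simp [chunkRef]
  | case2 c t ih =>
      have hN : (if (0:Int) < (((c :: t).length : Nat) : Int)
          then (((((c :: t).length : Nat) : Int) - 0 + DIVISION - 1) / DIVISION).toNat else 0)
          = (if (0:Int) < (((List.drop 32 (c :: t)).length : Nat) : Int)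
          then (((((List.drop 32 (c :: t)).length : Nat) : Int) - 0 + DIVISION - 1) / DIVISION).toNat else 0) + 1 := by
        simp [DIVISION, List.length_drop]
        by_cases hlen : 31 < t.length
        · rw [if_pos (by exact_mod_cast by omega)]
          omega
        · rw [if_neg (by exact_mod_cast by omega)]
          omega
      rw [hN, List.range_succ_eq_map]
      simp only [List.map_cons, List.flatten_cons, List.map_map, List.cons_append]
      rw [chunkRef]
      congr 1
      simp only [Nat.cast_zero, mul_zero, add_zero, zero_add]
      congr 1
      · -- first chunk: M[0:32] = take 32 M
        simpa [DIVISION] using PySem.List.slice_natCast_add (c :: t) 0 32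
      · rw [← ih, List.map_map]
        apply congrArg
        apply List.map_congr_left
        intro k hk
        simp only [Function.comp_apply]
        congr 1
        have e1 := PySem.List.slice_natCast_add (c :: t) (32 * (k + 1)) 32
        have e2 := PySem.List.slice_natCast_add (List.drop 32 (c :: t)) (32 * k) 32
        rw [show DIVISION * ((Nat.succ k : Nat) : Int) = ((32 * (k + 1) : Nat) : Int) by
              push_cast [DIVISION]; ring,
            show ((32 * (k + 1) : Nat) : Int) + DIVISION = ((32 * (k + 1) : Nat) : Int) + ((32:Nat) : Int) by
              norm_num [DIVISION],
            show (0:Int) + DIVISION * ((k : Nat) : Int) = ((32 * k : Nat) : Int) by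
              push_cast [DIVISION]; ring,
            show ((32 * k : Nat) : Int) + DIVISION = ((32 * k : Nat) : Int) + ((32:Nat) : Int) by
              norm_num [DIVISION]]
        rw [e1, e2, List.drop_drop]
        rw [show (32:Nat) + 32 * k = 32 * (k + 1) from by ring]

theorem max?_ofList_id (xs : List Int) :
    PySem.List.max? (PySem.Set.ofList xs) (fun x => x) = PySem.List.max? xs (fun x => x) := by
  cases h1 : PySem.List.max? (PySem.Set.ofList xs) (fun x : Int => x) with
  | none =>
      have hx : PySem.Set.ofList xs = [] := (PySem.List.max?_eq_none_iff _ _).mp h1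
      have : xs = [] := by
        by_contra hne
        obtain ⟨a, ha⟩ := List.exists_mem_of_ne_nil xs hne
        have : a ∈ PySem.Set.ofList xs := (PySem.Set.mem_ofList xs a).mpr ha
        simp [hx] at this
      simp [this, PySem.List.max?]
  | some m1 =>
      cases h2 : PySem.List.max? xs (fun x : Int => x) with
      | none =>
          have hx : xs = [] := (PySem.List.max?_eq_none_iff _ _).mp h2
          subst hx
          simp [PySem.Set.ofList, PySem.List.max?] at h1
      | some m2 =>
          have hm1 : m1 ∈ xs := (PySem.Set.mem_ofList xs m1).mp (PySem.List.max?_mem h1)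
          have hm2 : m2 ∈ PySem.Set.ofList xs := (PySem.Set.mem_ofList xs m2).mpr (PySem.List.max?_mem h2)
          have le1 : m1 ≤ m2 := PySem.List.max?_isMax h2 m1 hm1
          have le2 : m2 ≤ m1 := PySem.List.max?_isMax h1 m2 hm2
          simp [le_antisymm le1 le2]

-- ===== VERDICT (by name: the statement is the Claim_ definition above) =====
theorem makeChartCode_spec : Claim_equal_makeChartCode := by
  intro beats _ hpre
  unfold Spec_makeChartCode
  cases hmx : PySem.List.max? beats (fun x : Int => x) with
  | none => simp [makeChartCode, makeChartCode_alt, max?_ofList_id, hmx]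
  | some mx =>
      simp only [makeChartCode, makeChartCode_alt, max?_ofList_id, hmx]
      congr 1
      rw [foldA_txt]
      rw [refA_eq_chunkRef ((PySem.List.pyRange 0 mx 1).map (fun n => decide (n ∈ PySem.Set.ofList beats))).length _ 0 (le_refl _) (by norm_num)
          (by rw [PySem.Int.mod_eq_emod_of_pos (by norm_num [DIVISION] : (0:Int) < DIVISION)]; simp)]
      rw [List.map_map]
      have hfun : (charOf ∘ fun n => decide (n ∈ PySem.Set.ofList beats))
          = fun n : Int => if decide (n ∈ PySem.Set.ofList beats) then 'n' else '.' := by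
        funext n; simp [Function.comp, charOf]
      rw [hfun]
      rw [chunkJoin_eq_chunkRef]
      simp
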